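-- pv_equiv track=rewrite | github.com/mydice/bh-ps | QR/QR_Coordinates_Converter.py | coordinate_to_pixel
-- ===== SOURCE A (Python) =====
-- def coordinate_to_pixel(clist, w = 100, op = (0,0), scaler = 1):
--     plist = []
--     (x0,y0) = op
--     for (x,y) in clist:
--         plist = plist + [j*w+i
--                          for i in range(x0+x*scaler,x0+(x+1)*scaler)
--                          for j in range(y0+y*scaler,y0+(y+1)*scaler)]
--     return plist
-- ===== SOURCE B (Python) =====
-- def coordinate_to_pixel(clist, w = 100, op = (0,0), scaler = 1):
--     # Single flat pass over all n*scaler^2 output positions, decoding each flat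
--     # index k into (cell, di, dj) with divmod arithmetic -- no nested range loops.
--     if scaler <= 0:
--         return []
--     (x0, y0) = op
--     s2 = scaler * scaler
--     out = []
--     for k in range(len(clist) * s2):
--         (x, y) = clist[k // s2]
--         di, dj = divmod(k % s2, scaler)
--         out.append((y0 + y*scaler + dj)*w + x0 + x*scaler + di)
--     return out
-- ===== Notes on version B (the rewrite author's own statement) =====
-- stated objective: alternative
-- what changed: B replaces A's nested range-product per cell (with quadratic list re-concatenation) by one flat loop over all n*scaler^2 output indices, decoding each flat index into (cell, di, dj) by divmod arithmetic and appending in place.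
import Mathlib
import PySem

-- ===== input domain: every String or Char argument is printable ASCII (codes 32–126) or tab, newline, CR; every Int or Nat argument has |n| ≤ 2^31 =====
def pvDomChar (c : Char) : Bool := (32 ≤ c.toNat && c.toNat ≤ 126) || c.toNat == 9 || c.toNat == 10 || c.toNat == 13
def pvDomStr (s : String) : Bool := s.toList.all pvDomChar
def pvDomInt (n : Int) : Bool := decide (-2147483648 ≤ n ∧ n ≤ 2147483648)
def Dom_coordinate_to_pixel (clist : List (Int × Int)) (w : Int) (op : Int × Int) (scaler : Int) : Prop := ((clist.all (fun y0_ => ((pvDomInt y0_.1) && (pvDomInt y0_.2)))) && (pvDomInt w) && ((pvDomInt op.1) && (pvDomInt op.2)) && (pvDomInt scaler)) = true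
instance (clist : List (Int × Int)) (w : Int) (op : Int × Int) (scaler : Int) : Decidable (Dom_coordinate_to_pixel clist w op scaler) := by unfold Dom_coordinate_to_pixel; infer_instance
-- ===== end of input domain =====

-- B replaces A's per-cell nested range product (with repeated list concatenation) by one
-- flat pass over all n*scaler^2 output indices, decoding each index by divmod arithmetic.
-- ===== PORT A =====
def coordinate_to_pixel (clist : List (Int × Int)) (w : Int) (op : Int × Int) (scaler : Int) : List Int :=
  let x0 := op.1
  let y0 := op.2
  clist.foldl (fun plist xy =>
    plist ++ (PySem.List.pyRange (x0 + xy.1*scaler) (x0 + (xy.1+1)*scaler) 1).flatMap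
      (fun i => (PySem.List.pyRange (y0 + xy.2*scaler) (y0 + (xy.2+1)*scaler) 1).map (fun j => j*w + i))) []

-- ===== PORT B =====
def coordinate_to_pixel_alt (clist : List (Int × Int)) (w : Int) (op : Int × Int) (scaler : Int) : List Int :=
  if scaler ≤ 0 then []
  else
    let x0 := op.1
    let y0 := op.2
    let s2 := scaler * scaler
    -- the append loop, ported linearly: cons onto the accumulator, reverse at the end
    ((PySem.List.pyRange 0 ((clist.length : Int) * s2) 1).foldl
      (fun out k =>
        -- clist[k // s2]: the index is always in range, so the default is never used
        let xy := PySem.List.pyGetD clist (PySem.Int.floordiv k s2) (0, 0)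
        let di := PySem.Int.floordiv (PySem.Int.mod k s2) scaler
        let dj := PySem.Int.mod (PySem.Int.mod k s2) scaler
        ((y0 + xy.2*scaler + dj)*w + x0 + xy.1*scaler + di) :: out) []).reverse

-- ===== PRECONDITION & SPEC =====
def Spec_coordinate_to_pixel (clist : List (Int × Int)) (w : Int) (op : Int × Int) (scaler : Int) (out : List Int) : Prop := out = coordinate_to_pixel_alt clist w op scaler
instance (clist : List (Int × Int)) (w : Int) (op : Int × Int) (scaler : Int) (out : List Int) : Decidable (Spec_coordinate_to_pixel clist w op scaler out) := by unfold Spec_coordinate_to_pixel; infer_instance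

-- ===== CLAIM (what is proved, stated in full; the proofs are below) =====
def Claim_equal_coordinate_to_pixel : Prop := ∀ (clist : List (Int × Int)) (w : Int) (op : Int × Int) (scaler : Int), Dom_coordinate_to_pixel clist w op scaler → Spec_coordinate_to_pixel clist w op scaler (coordinate_to_pixel clist w op scaler)

-- ===== LEMMAS AND PROOFS =====

-- an append loop accumulated by cons then reversed is the map
theorem pvFoldl_cons_rev {α β : Type} (f : α → β) (l : List α) :
    ∀ (acc : List β), (l.foldl (fun acc x => f x :: acc) acc).reverse = acc.reverse ++ l.map f := by
  induction l with
  | nil => intro acc; simp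
  | cons x xs ih => intro acc; simp [List.foldl_cons]

-- A's per-cell block of pixel indices
def pvBlock (w x0 y0 s : Int) (c : Int × Int) : List Int :=
  (PySem.List.pyRange (x0 + c.1*s) (x0 + (c.1+1)*s) 1).flatMap
    (fun i => (PySem.List.pyRange (y0 + c.2*s) (y0 + (c.2+1)*s) 1).map (fun j => j*w + i))

-- A is the concatenation of the per-cell blocks
theorem pvA_eq_flatMap (clist : List (Int × Int)) (w : Int) (op : Int × Int) (s : Int) :
    coordinate_to_pixel clist w op s = clist.flatMap (pvBlock w op.1 op.2 s) := by
  simp only [coordinate_to_pixel]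
  rw [PySem.List.foldl_append_eq_flatMap, List.nil_append]
  rfl

-- decode lemma: mapping a divmod decode over a flat range of length n*s equals the nested loops
theorem pvDecode (s : Int) (hs : 0 < s) (F : Int → Int → Int) : ∀ (n : Nat),
    (PySem.List.pyRange 0 ((n : Int) * s) 1).map
        (fun k => F (PySem.Int.floordiv k s) (PySem.Int.mod k s))
      = (PySem.List.pyRange 0 (n : Int) 1).flatMap
          (fun q => (PySem.List.pyRange 0 s 1).map (fun r => F q r)) := by
  intro n
  induction n with
  | zero => simp [PySem.List.pyRange_one_eq_nil]
  | succ m ih =>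
    have h1 : ((m : Int) + 1) * s = (m : Int) * s + s := by ring
    have hms : (0 : Int) ≤ (m : Int) * s := by positivity
    rw [show ((m + 1 : Nat) : Int) = (m : Int) + 1 by push_cast; ring, h1,
        PySem.List.pyRange_one_append 0 ((m : Int) * s) ((m : Int) * s + s) hms (by omega),
        PySem.List.pyRange_one_succ_right (a := 0) (b := (m : Int)) (by positivity),
        List.map_append, List.flatMap_append, ih]
    congr 1
    have h2 : PySem.List.pyRange ((m : Int) * s) ((m : Int) * s + s) 1
        = (PySem.List.pyRange 0 s 1).map (fun r => (m : Int) * s + r) := by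
      rw [PySem.List.pyRange_one, PySem.List.pyRange_one]
      simp [List.map_map, Function.comp]
    rw [h2, List.map_map]
    simp only [List.flatMap_cons, List.flatMap_nil, List.append_nil]
    apply List.map_congr_left
    intro r hr
    rw [PySem.List.mem_pyRange_one] at hr
    have hq : PySem.Int.floordiv ((m : Int) * s + r) s = (m : Int) := by
      rw [PySem.Int.floordiv_eq_iff_of_pos hs]
      constructor <;> nlinarith [hr.1, hr.2]
    have hm : PySem.Int.mod ((m : Int) * s + r) s = r := by
      have := PySem.Int.floordiv_mul_add_mod ((m : Int) * s + r) s
      rw [hq] at this; omega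
    simp [Function.comp, hq, hm]

-- A's block equals the flat divmod-decoded form used by B (one cell)
theorem pvBlock_decode (w x0 y0 s : Int) (hs : 0 < s) (c : Int × Int) :
    pvBlock w x0 y0 s c
      = (PySem.List.pyRange 0 (s * s) 1).map (fun r =>
          (y0 + c.2*s + PySem.Int.mod (PySem.Int.mod r (s*s)) s)*w
            + x0 + c.1*s + PySem.Int.floordiv (PySem.Int.mod r (s*s)) s) := by
  have hmod : ∀ r ∈ PySem.List.pyRange 0 (s*s) 1, PySem.Int.mod r (s*s) = r := by
    intro r hr
    rw [PySem.List.mem_pyRange_one] at hr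
    rw [PySem.Int.mod_eq_emod_of_pos (by positivity)]
    exact Int.emod_eq_of_lt hr.1 hr.2
  rw [List.map_congr_left (fun r hr => by rw [hmod r hr])]
  have hss : s * s = ((s.toNat : Nat) : Int) * s := by
    rw [Int.toNat_of_nonneg (le_of_lt hs)]
  rw [hss, pvDecode s hs (fun q r => (y0 + c.2*s + r)*w + x0 + c.1*s + q) s.toNat]
  unfold pvBlock
  have hx : x0 + (c.1+1)*s - (x0 + c.1*s) = s - 0 := by ring
  have hy : y0 + (c.2+1)*s - (y0 + c.2*s) = s - 0 := by ring
  rw [Int.toNat_of_nonneg (le_of_lt hs)]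
  simp only [PySem.List.pyRange_one, hx, hy, List.flatMap_map, List.map_map]
  apply List.flatMap_congr
  intro q _
  apply List.map_congr_left
  intro r _
  simp only [Function.comp]
  ring

-- the flat pass over the whole list equals the concatenation of the per-cell flat passes
theorem pvFlat (s2 : Int) (hs2 : 0 < s2) (g : (Int × Int) → Int → Int) :
    ∀ (clist : List (Int × Int)),
    (PySem.List.pyRange 0 ((clist.length : Int) * s2) 1).map
        (fun k => g (PySem.List.pyGetD clist (PySem.Int.floordiv k s2) (0, 0))
                    (PySem.Int.mod k s2))
      = clist.flatMap (fun c => (PySem.List.pyRange 0 s2 1).map (g c)) := by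
  intro clist
  induction clist with
  | nil => simp [PySem.List.pyRange_one_eq_nil]
  | cons c rest ih =>
    have hL : ((c :: rest).length : Int) * s2 = s2 + (rest.length : Int) * s2 := by
      simp [List.length_cons]; ring
    have hrs : (0 : Int) ≤ (rest.length : Int) * s2 := by positivity
    rw [hL, PySem.List.pyRange_one_append 0 s2 (s2 + (rest.length : Int) * s2)
          (le_of_lt hs2) (by omega),
        List.map_append, List.flatMap_cons]
    congr 1
    · -- first segment: indices 0 ≤ k < s2 hit cell c
      apply List.map_congr_left
      intro k hk
      rw [PySem.List.mem_pyRange_one] at hk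
      have hq : PySem.Int.floordiv k s2 = 0 := by
        rw [PySem.Int.floordiv_eq_iff_of_pos hs2]; omega
      have hm : PySem.Int.mod k s2 = k := by
        have := PySem.Int.floordiv_mul_add_mod k s2
        rw [hq] at this; omega
      simp [hq, hm, PySem.List.pyGetD_zero_cons]
    · -- tail segment: shift by s2, reduce to the IH for rest
      have h2 : PySem.List.pyRange s2 (s2 + (rest.length : Int) * s2) 1
          = (PySem.List.pyRange 0 ((rest.length : Int) * s2) 1).map (fun k => s2 + k) := by
        rw [PySem.List.pyRange_one, PySem.List.pyRange_one]
        simp [List.map_map, Function.comp]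
      rw [h2, List.map_map, ← ih]
      apply List.map_congr_left
      intro k hk
      rw [PySem.List.mem_pyRange_one] at hk
      have hq : PySem.Int.floordiv (s2 + k) s2 = 1 + PySem.Int.floordiv k s2 := by
        have h1 := PySem.Int.floordiv_eq_iff_of_pos hs2 (a := k) (q := PySem.Int.floordiv k s2)
        have h1' := h1.mp rfl
        rw [PySem.Int.floordiv_eq_iff_of_pos hs2]
        constructor <;> nlinarith [h1'.1, h1'.2]
      have hm : PySem.Int.mod (s2 + k) s2 = PySem.Int.mod k s2 := by
        have ha := PySem.Int.floordiv_mul_add_mod (s2 + k) s2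
        have hb := PySem.Int.floordiv_mul_add_mod k s2
        rw [hq] at ha; nlinarith [ha, hb]
      have hidx : PySem.List.pyGetD (c :: rest) (1 + PySem.Int.floordiv k s2) (0, 0)
          = PySem.List.pyGetD rest (PySem.Int.floordiv k s2) (0, 0) := by
        have hq0 : 0 ≤ PySem.Int.floordiv k s2 := by
          rw [PySem.Int.floordiv_eq_ediv_of_pos hs2]
          exact Int.ediv_nonneg hk.1 (le_of_lt hs2)
        have hlt : PySem.Int.floordiv k s2 < (rest.length : Int) := by
          rw [PySem.Int.floordiv_lt_iff_lt_mul hs2]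
          exact hk.2
        rw [PySem.List.pyGetD_eq_getElem _ _ (by omega) (by simp [List.length_cons]; omega),
            PySem.List.pyGetD_eq_getElem _ _ hq0 (by omega)]
        have ht : (1 + PySem.Int.floordiv k s2).toNat = (PySem.Int.floordiv k s2).toNat + 1 := by
          omega
        simp [ht]
      simp only [Function.comp, hq, hm, hidx]

-- main equality
theorem pv_main (clist : List (Int × Int)) (w : Int) (op : Int × Int) (scaler : Int) :
    coordinate_to_pixel clist w op scaler = coordinate_to_pixel_alt clist w op scaler := by
  rw [pvA_eq_flatMap]
  unfold coordinate_to_pixel_alt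
  by_cases hs : scaler ≤ 0
  · rw [if_pos hs]
    have hb : ∀ c ∈ clist, pvBlock w op.1 op.2 scaler c = [] := by
      intro c _
      unfold pvBlock
      rw [PySem.List.pyRange_one_eq_nil (by nlinarith)]
      simp
    rw [List.flatMap_congr hb]
    simp
  · rw [if_neg hs]
    have hs' : 0 < scaler := by omega
    simp only []
    rw [pvFoldl_cons_rev, List.reverse_nil, List.nil_append,
        pvFlat (scaler * scaler) (by positivity)
          (fun xy r => (op.2 + xy.2*scaler + PySem.Int.mod r scaler)*w
              + op.1 + xy.1*scaler + PySem.Int.floordiv r scaler) clist]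
    apply List.flatMap_congr
    intro c _
    rw [pvBlock_decode w op.1 op.2 scaler hs' c]
    apply List.map_congr_left
    intro r hr
    rw [PySem.List.mem_pyRange_one] at hr
    have hm : PySem.Int.mod r (scaler * scaler) = r := by
      rw [PySem.Int.mod_eq_emod_of_pos (by positivity)]
      exact Int.emod_eq_of_lt hr.1 hr.2
    rw [hm]

-- ===== VERDICT (by name: the statement is the Claim_ definition above) =====
theorem coordinate_to_pixel_spec : Claim_equal_coordinate_to_pixel := by
  intro clist w op scaler _
  unfold Spec_coordinate_to_pixel
  exact pv_main clist w op scaler
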